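-- pv_equiv track=rewrite | github.com/gh0stintheshe11/LeetCode-Solutions | solutions/2068.maximum-genetic-difference-query/Python3.py | maxGeneticDifference
-- ===== SOURCE A (Python) =====
-- from typing import List, Dict
-- from collections import defaultdict
--
-- class TrieNode:
--     def __init__(self):
--         self.children = {}
--         self.count = 0
--
-- def maxGeneticDifference(parents: List[int], queries: List[List[int]]) -> List[int]:
--     def insert(x: int):
--         node = root
--         for i in range(20, -1, -1):
--             bit = (x >> i) & 1
--             if bit not in node.children:
--                 node.children[bit] = TrieNode()
--             node = node.children[bit]
--             node.count += 1
--
--     def remove(x: int):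
--         node = root
--         for i in range(20, -1, -1):
--             bit = (x >> i) & 1
--             node = node.children[bit]
--             node.count -= 1
--
--     def max_xor(x: int) -> int:
--         node = root
--         ans = 0
--         for i in range(20, -1, -1):
--             bit = (x >> i) & 1
--             opposite_bit = 1 - bit
--             if opposite_bit in node.children and node.children[opposite_bit].count > 0:
--                 ans |= (1 << i)
--                 node = node.children[opposite_bit]
--             else:
--                 node = node.children[bit]
--         return ans
--
--     n = len(parents)
--     tree = defaultdict(list)
--     rootIdx = None
--
--     for child, parent in enumerate(parents):
--         if parent == -1:
--             rootIdx = child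
--         else:
--             tree[parent].append(child)
--
--     max_queries = defaultdict(list)
--     for i, (node, val) in enumerate(queries):
--         max_queries[node].append((val, i))
--
--     results = [0] * len(queries)
--     root = TrieNode()
--
--     def dfs(node: int):
--         insert(node)
--
--         if node in max_queries:
--             for val, idx in max_queries[node]:
--                 results[idx] = max_xor(val)
--
--         for child in tree[node]:
--             dfs(child)
--
--         remove(node)
--
--     dfs(rootIdx)
--     return results
-- ===== SOURCE B (Python) =====
-- # B: same answers via a flat hash counter keyed by heap-style prefix codes (p = p*2+bit,
-- # starting at 1) instead of a pointer-based trie, and an explicit-stack iterative DFS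
-- # instead of recursion.
-- from collections import defaultdict
--
-- def maxGeneticDifference(parents, queries):
--     tree = defaultdict(list)
--     rootIdx = None
--     for child, parent in enumerate(parents):
--         if parent == -1:
--             rootIdx = child
--         else:
--             tree[parent].append(child)
--
--     qs = defaultdict(list)
--     for i, (node, val) in enumerate(queries):
--         qs[node].append((val, i))
--
--     cnt = defaultdict(int)
--     res = [0] * len(queries)
--
--     def update(x, delta):
--         p = 1
--         for i in range(20, -1, -1):
--             p = p * 2 + ((x >> i) & 1)
--             cnt[p] += delta
--
--     def best(v):
--         p, ans = 1, 0
--         for i in range(20, -1, -1):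
--             b = (v >> i) & 1
--             cand = p * 2 + (1 - b)
--             if cnt[cand] > 0:
--                 ans |= 1 << i
--                 p = cand
--             else:
--                 p = p * 2 + b
--         return ans
--
--     stack = [(rootIdx, False)]
--     while stack:
--         node, done = stack.pop()
--         if done:
--             update(node, -1)
--             continue
--         update(node, 1)
--         for val, idx in qs[node]:
--             res[idx] = best(val)
--         stack.append((node, True))
--         for c in reversed(tree[node]):
--             stack.append((c, False))
--     return res
-- ===== Notes on version B (the rewrite author's own statement) =====
-- stated objective: alternative
-- what changed: The pointer-based binary trie (TrieNode objects with insert/remove/max_xor) and the recursive DFS are replaced by one flat hash counter keyed by heap-style prefix codes (p = p*2+bit starting from 1, a single update(x,delta) helper) and an explicit-stack iterative post-order DFS.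
import Mathlib
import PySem

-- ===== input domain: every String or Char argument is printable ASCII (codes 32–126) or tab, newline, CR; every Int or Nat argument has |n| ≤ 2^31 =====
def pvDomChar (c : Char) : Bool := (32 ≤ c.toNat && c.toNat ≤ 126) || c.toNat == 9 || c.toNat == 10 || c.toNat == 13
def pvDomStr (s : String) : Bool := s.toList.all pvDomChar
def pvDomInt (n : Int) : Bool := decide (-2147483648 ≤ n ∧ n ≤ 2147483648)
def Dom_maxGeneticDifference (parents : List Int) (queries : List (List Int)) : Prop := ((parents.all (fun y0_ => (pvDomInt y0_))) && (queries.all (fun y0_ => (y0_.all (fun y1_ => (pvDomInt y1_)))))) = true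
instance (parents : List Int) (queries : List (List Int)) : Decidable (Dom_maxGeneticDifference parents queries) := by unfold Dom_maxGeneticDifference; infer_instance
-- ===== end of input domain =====

-- B changes A's data structure and control (flat prefix-code counter + explicit-stack DFS
-- instead of a pointer trie + recursion); equal return values are proved on Pre_.

-- ===== shared helpers (this code is literally identical in Source A and Source B) =====

-- (x >> i) & 1
def pvBit (x : Int) (i : Nat) : Int := PySem.Int.band (x >>> i) 1

-- range(20, -1, -1)
def pvLevels : List Nat := (List.range 21).reverse

-- the tree-building loop over enumerate(parents): returns (tree, rootIdx)
def pvBuildTree (parents : List Int) : PySem.Dict Int (List Int) × Option Int :=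
  (PySem.List.enumerate parents 0).foldl
    (fun acc cp =>
      if cp.2 = -1 then (acc.1, some cp.1)
      else (acc.1.insert cp.2 (acc.1.getD cp.2 [] ++ [cp.1]), acc.2))
    (PySem.Dict.empty, none)

-- the query-grouping loop; exact for length-2 queries (Pre_); Python raises ValueError otherwise
def pvGroupQueries (queries : List (List Int)) : PySem.Dict Int (List (Int × Int)) :=
  (PySem.List.enumerate queries 0).foldl
    (fun d iq =>
      d.insert (iq.2.headD 0) (d.getD (iq.2.headD 0) [] ++ [((iq.2.drop 1).headD 0, iq.1)]))
    PySem.Dict.empty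

-- totality guard for the DFS of both ports: the set of not-yet-visited node indices.
-- (Python visits every reachable node exactly once, so the guard never fires on a real run.)
def pvRemaining (n : Nat) : Finset Int := (Finset.range n).image (fun k : Nat => (k : Int))

-- ===== PORT A =====

inductive PTrie where
  | nil : PTrie                                   -- "key absent in node.children"
  | node : Int → PTrie → PTrie → PTrie            -- TrieNode(count, children[0], children[1])
deriving DecidableEq

def PTrie.childOf : PTrie → Int → PTrie
  | .nil, _ => .nil
  | .node _ a b, bit => if bit = 0 then a else b

def PTrie.countOf : PTrie → Int
  | .nil => 0
  | .node k _ _ => k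

def PTrie.setCount : PTrie → Int → PTrie
  | .nil, v => .node v .nil .nil
  | .node _ a b, v => .node v a b

def PTrie.setChild : PTrie → Int → PTrie → PTrie
  | .nil, bit, c => if bit = 0 then .node 0 c .nil else .node 0 .nil c
  | .node k a b, bit, c => if bit = 0 then .node k c b else .node k a c

def PTrie.ensure : PTrie → PTrie
  | .nil => .node 0 .nil .nil                     -- "if bit not in node.children: children[bit] = TrieNode()"
  | t => t

-- def insert(x): walk bits 20..0, create missing children, bump each child's count
def insGo (x : Int) : List Nat → PTrie → PTrie
  | [], t => t
  | i :: rest, t =>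
      let c := ((t.childOf (pvBit x i)).ensure)
      t.setChild (pvBit x i) (insGo x rest (c.setCount (c.countOf + 1)))

def insertA (x : Int) (t : PTrie) : PTrie := insGo x pvLevels t

-- def remove(x): walk bits 20..0 decrementing counts (setCount on nil totalizes the
-- KeyError Python would raise; unreachable, remove is only called on inserted values)
def remGo (x : Int) : List Nat → PTrie → PTrie
  | [], t => t
  | i :: rest, t =>
      let c := (t.childOf (pvBit x i))
      t.setChild (pvBit x i) (remGo x rest (c.setCount (c.countOf - 1)))

def removeA (x : Int) (t : PTrie) : PTrie := remGo x pvLevels t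

-- def max_xor(x) (childOf on a missing child totalizes the KeyError; unreachable on real runs)
def maxGo (x : Int) : List Nat → PTrie → Int → Int
  | [], _, ans => ans
  | i :: rest, nd, ans =>
      let oc := nd.childOf (1 - pvBit x i)
      if oc ≠ PTrie.nil ∧ oc.countOf > 0 then
        maxGo x rest oc (PySem.Int.bor ans (1 <<< i))
      else
        maxGo x rest (nd.childOf (pvBit x i)) ans

def maxXorA (x : Int) (t : PTrie) : Int := maxGo x pvLevels t 0

-- def dfs(node): insert, answer queries, recurse into children, remove.
-- Totality guards (pure artifacts, unreachable on any real run): the `remaining` set of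
-- not-yet-visited indices (Python visits every reachable node exactly once) and a fuel
-- that decreases once per visited node, so fuel = n+1 always suffices.
def dfsA (tree : PySem.Dict Int (List Int)) (qs : PySem.Dict Int (List (Int × Int))) :
    Nat → Int → Finset Int → PTrie → List Int → Finset Int × PTrie × List Int
  | 0, _, remaining, trie, res => (remaining, trie, res)
  | fuel + 1, node, remaining, trie, res =>
    if node ∈ remaining then
      let t1 := insertA node trie
      let res1 := (qs.getD node []).foldl (fun r vi => r.set vi.2.toNat (maxXorA vi.1 t1)) res
      let o := (tree.getD node []).foldl
        (fun acc c => dfsA tree qs fuel c acc.1 acc.2.1 acc.2.2) (remaining.erase node, t1, res1)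
      (o.1, removeA node o.2.1, o.2.2)
    else (remaining, trie, res)

def maxGeneticDifference (parents : List Int) (queries : List (List Int)) : List Int :=
  match (pvBuildTree parents).2 with
  | none => List.replicate queries.length 0      -- Python raises TypeError here (dfs(None)); excluded by Pre_
  | some r =>
      (dfsA (pvBuildTree parents).1 (pvGroupQueries queries) (parents.length + 1) r
        (pvRemaining parents.length) (PTrie.node 0 .nil .nil) (List.replicate queries.length 0)).2.2

-- ===== PORT B =====

-- def update(x, delta): p = p*2+bit down the 21 bits, cnt[p] += delta
def updAux (x δ : Int) : List Nat → Int → PySem.Dict Int Int → PySem.Dict Int Int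
  | [], _, cnt => cnt
  | i :: rest, p, cnt => updAux x δ rest (p * 2 + pvBit x i) ((cnt.modify (p * 2 + pvBit x i) 0 (· + δ)))

def updB (x δ : Int) (cnt : PySem.Dict Int Int) : PySem.Dict Int Int := updAux x δ pvLevels 1 cnt

-- def best(v)  (cnt[cand] on the defaultdict only reads the value; ported as getD)
def bestAux (cnt : PySem.Dict Int Int) (v : Int) : List Nat → Int → Int → Int
  | [], _, ans => ans
  | i :: rest, p, ans =>
      if cnt.getD (p * 2 + (1 - pvBit v i)) 0 > 0 then
        bestAux cnt v rest (p * 2 + (1 - pvBit v i)) (PySem.Int.bor ans (1 <<< i))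
      else
        bestAux cnt v rest (p * 2 + pvBit v i) ans

def bestB (cnt : PySem.Dict Int Int) (v : Int) : Int := bestAux cnt v pvLevels 1 0

-- the while-stack loop; frames (node, done), top of stack = head of the list.
-- Totality guards as in port A: the `remaining` set plus a fuel that decreases only on
-- the one step kind that grows the stack (first visit of a node), so fuel = n+1 suffices.
def runBStep (tree : PySem.Dict Int (List Int)) (qs : PySem.Dict Int (List (Int × Int)))
    (go : List (Int × Bool) → Finset Int → PySem.Dict Int Int → List Int → List Int) :
    List (Int × Bool) → Finset Int → PySem.Dict Int Int → List Int → List Int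
  | [], _, _, res => res
  | (node, true) :: rest, rem, cnt, res => runBStep tree qs go rest rem (updB node (-1) cnt) res
  | (node, false) :: rest, rem, cnt, res =>
    if node ∈ rem then
      go ((tree.getD node []).map (fun c => (c, false)) ++ (node, true) :: rest) (rem.erase node)
        (updB node 1 cnt)
        ((qs.getD node []).foldl (fun r vi => r.set vi.2.toNat (bestB (updB node 1 cnt) vi.1)) res)
    else runBStep tree qs go rest rem cnt res

def runB (tree : PySem.Dict Int (List Int)) (qs : PySem.Dict Int (List (Int × Int))) :
    Nat → List (Int × Bool) → Finset Int → PySem.Dict Int Int → List Int → List Int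
  | 0, _, _, _, res => res
  | fuel + 1, frames, rem, cnt, res => runBStep tree qs (runB tree qs fuel) frames rem cnt res

def maxGeneticDifference_alt (parents : List Int) (queries : List (List Int)) : List Int :=
  match (pvBuildTree parents).2 with
  | none => List.replicate queries.length 0      -- Python raises TypeError here too (None >> i); excluded by Pre_
  | some r =>
      runB (pvBuildTree parents).1 (pvGroupQueries queries) (parents.length + 1) [(r, false)]
        (pvRemaining parents.length) PySem.Dict.empty (List.replicate queries.length 0)

-- ===== PRECONDITION & SPEC =====

-- exactly the inputs on which Python A returns: a root exists (else dfs(None) raises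
-- TypeError) and every query has exactly two entries (else unpacking raises ValueError)
def Pre_maxGeneticDifference (parents : List Int) (queries : List (List Int)) : Prop :=
  (-1 : Int) ∈ parents ∧ ∀ q ∈ queries, q.length = 2

instance (parents : List Int) (queries : List (List Int)) : Decidable (Pre_maxGeneticDifference parents queries) := by
  unfold Pre_maxGeneticDifference; infer_instance

def pvWitness_maxGeneticDifference : List Int × List (List Int) := ([-1, 0], [[0, 3], [1, 5]])

def Spec_maxGeneticDifference (parents : List Int) (queries : List (List Int)) (out : List Int) : Prop := out = maxGeneticDifference_alt parents queries
instance (parents : List Int) (queries : List (List Int)) (out : List Int) : Decidable (Spec_maxGeneticDifference parents queries out) := by unfold Spec_maxGeneticDifference; infer_instance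

-- ===== CLAIM (what is proved, stated in full; the proofs are below) =====
def Claim_equal_maxGeneticDifference : Prop := ∀ (parents : List Int) (queries : List (List Int)), Dom_maxGeneticDifference parents queries → Pre_maxGeneticDifference parents queries → Spec_maxGeneticDifference parents queries (maxGeneticDifference parents queries)

-- ===== LEMMAS AND PROOFS =====

-- heap-style prefix code of a bit path, seeded with p0
def pvEnc (p0 : Int) (bs : List Int) : Int := bs.foldl (fun p b => p * 2 + b) p0

def Bits01 (bs : List Int) : Prop := ∀ b ∈ bs, b = 0 ∨ b = 1

def PTrie.nodeAt : PTrie → List Int → PTrie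
  | t, [] => t
  | t, b :: bs => PTrie.nodeAt (t.childOf b) bs

-- invariant: B's counter holds, at the code of every path, the count of A's trie node there
def RelT (ℓ : Nat) (t : PTrie) (c : PySem.Dict Int Int) (p0 : Int) : Prop :=
  ∀ bs : List Int, Bits01 bs → 1 ≤ bs.length → bs.length ≤ ℓ →
    c.getD (pvEnc p0 bs) 0 = (PTrie.nodeAt t bs).countOf

def RFull (t : PTrie) (c : PySem.Dict Int Int) : Prop := RelT 21 t c 1

-- the counter keys update(x, δ) touches, in order
def pathKeys (x : Int) : List Nat → Int → List Int
  | [], _ => []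
  | i :: rest, p => (p * 2 + pvBit x i) :: pathKeys x rest (p * 2 + pvBit x i)

-- ---- basic PTrie facts ----

lemma childOf_setCount (t : PTrie) (v a : Int) : (t.setCount v).childOf a = t.childOf a := by
  cases t <;> simp [PTrie.setCount, PTrie.childOf]

lemma countOf_setCount (t : PTrie) (v : Int) : (t.setCount v).countOf = v := by
  cases t <;> rfl

lemma childOf_ensure (t : PTrie) (a : Int) : t.ensure.childOf a = t.childOf a := by
  cases t <;> simp [PTrie.ensure, PTrie.childOf]

lemma countOf_ensure (t : PTrie) : t.ensure.countOf = t.countOf := by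
  cases t <;> rfl

lemma countOf_setChild (t : PTrie) (b : Int) (c : PTrie) : (t.setChild b c).countOf = t.countOf := by
  cases t <;> simp [PTrie.setChild] <;> split <;> rfl

lemma childOf_setChild_self (t : PTrie) (b : Int) (c : PTrie) (hb : b = 0 ∨ b = 1) :
    (t.setChild b c).childOf b = c := by
  rcases hb with h | h <;> subst h <;> cases t <;> simp [PTrie.setChild, PTrie.childOf]

lemma childOf_setChild_of_ne (t : PTrie) (b b' : Int) (c : PTrie) (hb : b = 0 ∨ b = 1)
    (hb' : b' = 0 ∨ b' = 1) (hne : b' ≠ b) : (t.setChild b c).childOf b' = t.childOf b' := by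
  rcases hb with h | h <;> rcases hb' with h' | h' <;> subst h <;> subst h' <;>
    first
      | exact absurd rfl hne
      | (cases t <;> simp [PTrie.setChild, PTrie.childOf])

lemma countOf_insGo (x : Int) (is : List Nat) (t : PTrie) : (insGo x is t).countOf = t.countOf := by
  cases is <;> simp [insGo, countOf_setChild]

lemma countOf_remGo (x : Int) (is : List Nat) (t : PTrie) : (remGo x is t).countOf = t.countOf := by
  cases is <;> simp [remGo, countOf_setChild]

lemma nodeAt_nil (bs : List Int) : PTrie.nodeAt .nil bs = .nil := by
  induction bs with
  | nil => rfl
  | cons b bs ih => simp [PTrie.nodeAt, PTrie.childOf, ih]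

lemma nodeAt_append_singleton (t : PTrie) (bs : List Int) (b : Int) :
    t.nodeAt (bs ++ [b]) = (t.nodeAt bs).childOf b := by
  induction bs generalizing t with
  | nil => rfl
  | cons b' bs ih => simp [PTrie.nodeAt, ih]

lemma countOf_pos_ne_nil {t : PTrie} (h : t.countOf > 0) : t ≠ PTrie.nil := by
  intro he; subst he; exact absurd h (by decide)

-- ---- bits and prefix codes ----

lemma pvBit_01 (x : Int) (i : Nat) : pvBit x i = 0 ∨ pvBit x i = 1 := by
  unfold pvBit
  rw [PySem.Int.band_one]
  have h1 := PySem.Int.mod_nonneg (x >>> i) (by norm_num : (0:Int) < 2)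
  have h2 := PySem.Int.mod_lt (x >>> i) (by norm_num : (0:Int) < 2)
  omega

lemma pvEnc_nil (p0 : Int) : pvEnc p0 [] = p0 := rfl

lemma pvEnc_cons' (p0 b : Int) (bs : List Int) : pvEnc p0 (b :: bs) = pvEnc (p0 * 2 + b) bs := rfl

lemma pvEnc_singleton (p0 b : Int) : pvEnc p0 [b] = p0 * 2 + b := rfl

lemma pvEnc_append_singleton (p0 b : Int) (bs : List Int) :
    pvEnc p0 (bs ++ [b]) = (pvEnc p0 bs) * 2 + b := by
  simp [pvEnc, List.foldl_append]

lemma pvEnc_bounds : ∀ (bs : List Int) (p0 : Int), Bits01 bs → 0 ≤ p0 →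
    p0 * 2 ^ bs.length ≤ pvEnc p0 bs ∧ pvEnc p0 bs < (p0 + 1) * 2 ^ bs.length := by
  intro bs
  induction bs with
  | nil => intro p0 _ _; simp [pvEnc]
  | cons b bs ih =>
    intro p0 hb hp
    have hb0 : b = 0 ∨ b = 1 := hb b (by simp)
    have hrec := ih (p0 * 2 + b) (fun z hz => hb z (by simp [hz])) (by rcases hb0 with h | h <;> omega)
    rw [pvEnc_cons']
    have hpow : (0:Int) < 2 ^ bs.length := by positivity
    simp only [List.length_cons, pow_succ]
    constructor <;> rcases hb0 with h | h <;> subst h <;> nlinarith [hrec.1, hrec.2]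

lemma pvEnc_gt (bs : List Int) (p0 : Int) (hb : Bits01 bs) (hp : 1 ≤ p0) (hne : bs ≠ []) :
    p0 < pvEnc p0 bs := by
  have h := (pvEnc_bounds bs p0 hb (by omega)).1
  have hlen : 1 ≤ bs.length := List.length_pos_iff.mpr hne
  have h2 : (2:Int) ≤ 2 ^ bs.length := by
    calc (2:Int) = 2 ^ 1 := (pow_one 2).symm
    _ ≤ 2 ^ bs.length := pow_le_pow_right₀ (by norm_num) hlen
  nlinarith

lemma pvEnc_lt_of_len_lt (u v : List Int) (p0 : Int) (hu : Bits01 u) (hv : Bits01 v)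
    (hp : 1 ≤ p0) (hl : u.length < v.length) : pvEnc p0 u < pvEnc p0 v := by
  have b1 := pvEnc_bounds u p0 hu (by omega)
  have b2 := pvEnc_bounds v p0 hv (by omega)
  have hpow : (2:Int) ^ (u.length + 1) ≤ 2 ^ v.length :=
    pow_le_pow_right₀ (by norm_num) hl
  have hpos : (0:Int) < 2 ^ u.length := by positivity
  have key : (p0 + 1) * 2 ^ u.length ≤ p0 * 2 ^ v.length := by
    have h1 : (p0 + 1) * 2 ^ u.length ≤ p0 * 2 ^ (u.length + 1) := by
      rw [pow_succ]; nlinarith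
    have h2 : p0 * 2 ^ (u.length + 1) ≤ p0 * 2 ^ v.length := by nlinarith
    linarith
  linarith [b1.2, b2.1]

lemma pvEnc_inj : ∀ (u v : List Int) (p0 : Int), Bits01 u → Bits01 v → 1 ≤ p0 →
    pvEnc p0 u = pvEnc p0 v → u = v := by
  intro u
  induction u with
  | nil =>
    intro v p0 _ hv hp h
    cases v with
    | nil => rfl
    | cons c v' =>
      exact absurd h (by have := pvEnc_gt (c :: v') p0 hv hp (by simp); rw [pvEnc_nil]; omega)
  | cons a u' ih =>
    intro v p0 hu hv hp h
    cases v with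
    | nil =>
      exact absurd h (by have := pvEnc_gt (a :: u') p0 hu hp (by simp); rw [pvEnc_nil]; omega)
    | cons c v' =>
      have hu' : Bits01 u' := fun z hz => hu z (by simp [hz])
      have hv' : Bits01 v' := fun z hz => hv z (by simp [hz])
      have ha : a = 0 ∨ a = 1 := hu a (by simp)
      have hc : c = 0 ∨ c = 1 := hv c (by simp)
      have hlen : u'.length = v'.length := by
        by_contra hne
        rcases Nat.lt_or_ge u'.length v'.length with hl | hl
        · have := pvEnc_lt_of_len_lt (a :: u') (c :: v') p0 hu hv hp (by simpa using hl)
          omega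
        · rcases Nat.lt_or_ge v'.length u'.length with hl2 | hl2
          · have := pvEnc_lt_of_len_lt (c :: v') (a :: u') p0 hv hu hp (by simpa using hl2)
            omega
          · exact hne (by omega)
      have hac : a = c := by
        by_contra hne
        rw [pvEnc_cons', pvEnc_cons'] at h
        have b1 := pvEnc_bounds u' (p0 * 2 + a) hu' (by rcases ha with h' | h' <;> omega)
        have b2 := pvEnc_bounds v' (p0 * 2 + c) hv' (by rcases hc with h' | h' <;> omega)
        rw [hlen] at b1
        have hpow : (0:Int) < 2 ^ v'.length := by positivity
        rcases ha with h1 | h1 <;> rcases hc with h2 | h2 <;> subst h1 <;> subst h2 <;>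
          first
            | exact hne rfl
            | nlinarith [b1.1, b1.2, b2.1, b2.2]
      subst hac
      rw [pvEnc_cons', pvEnc_cons'] at h
      rw [ih v' (p0 * 2 + a) hu' hv' (by rcases ha with h' | h' <;> omega) h]

lemma pathKeys_shape (x : Int) : ∀ (is : List Nat) (q k : Int), k ∈ pathKeys x is q →
    ∃ cs, Bits01 cs ∧ cs ≠ [] ∧ k = pvEnc q cs := by
  intro is
  induction is with
  | nil => intro q k hk; simp [pathKeys] at hk
  | cons i rest ih =>
    intro q k hk
    rw [pathKeys] at hk
    rcases List.mem_cons.mp hk with h | h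
    · exact ⟨[pvBit x i], by intro z hz; simp at hz; subst hz; exact pvBit_01 x i, by simp,
        by rw [pvEnc_singleton]; exact h⟩
    · obtain ⟨cs, hcs, hne, he⟩ := ih (q * 2 + pvBit x i) k h
      exact ⟨pvBit x i :: cs,
        by intro z hz; rcases List.mem_cons.mp hz with h' | h'
           · subst h'; exact pvBit_01 x i
           · exact hcs z h',
        by simp, by rw [pvEnc_cons']; exact he⟩

lemma pathKeys_gt (x : Int) : ∀ (is : List Nat) (q k : Int), 1 ≤ q → k ∈ pathKeys x is q → q < k := by
  intro is
  induction is with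
  | nil => intro q k _ hk; simp [pathKeys] at hk
  | cons i rest ih =>
    intro q k hq hk
    have hbit := pvBit_01 x i
    rw [pathKeys] at hk
    rcases List.mem_cons.mp hk with h | h
    · subst h; rcases hbit with h' | h' <;> omega
    · have hq' : 1 ≤ q * 2 + pvBit x i := by rcases hbit with h' | h' <;> omega
      have := ih (q * 2 + pvBit x i) k hq' h
      rcases hbit with h' | h' <;> omega

lemma updAux_getD (x δ : Int) : ∀ (is : List Nat) (p0 : Int) (cnt : PySem.Dict Int Int) (k : Int),
    1 ≤ p0 →
    (updAux x δ is p0 cnt).getD k 0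
      = cnt.getD k 0 + (if k ∈ pathKeys x is p0 then δ else 0) := by
  intro is
  induction is with
  | nil => intro p0 cnt k _; simp [updAux, pathKeys]
  | cons i rest ih =>
    intro p0 cnt k hp
    have hbit := pvBit_01 x i
    have hp' : 1 ≤ p0 * 2 + pvBit x i := by rcases hbit with h | h <;> omega
    simp only [updAux]
    rw [ih _ _ _ hp']
    rw [pathKeys]
    by_cases hk : k = p0 * 2 + pvBit x i
    · subst hk
      rw [PySem.Dict.getD_modify_self]
      have hnot : (p0 * 2 + pvBit x i) ∉ pathKeys x rest (p0 * 2 + pvBit x i) :=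
        fun hm => absurd (pathKeys_gt x rest _ _ hp' hm) (lt_irrefl _)
      simp [hnot]
    · rw [PySem.Dict.getD_modify, if_neg hk]
      simp [List.mem_cons, hk]

-- ---- the invariant is preserved by insert/update and remove/update ----

lemma L_ins (x : Int) : ∀ (is : List Nat) (t : PTrie) (c : PySem.Dict Int Int) (p0 : Int),
    1 ≤ p0 → RelT is.length t c p0 → RelT is.length (insGo x is t) (updAux x 1 is p0 c) p0 := by
  intro is
  induction is with
  | nil =>
    intro t c p0 _ _ bs _ h1 h2
    simp only [List.length_nil, Nat.le_zero] at h2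
    exact absurd h1 (by omega)
  | cons i rest ih =>
    intro t c p0 hp hR bs hb h1 h2
    have hbit := pvBit_01 x i
    have hp' : 1 ≤ p0 * 2 + pvBit x i := by rcases hbit with h | h <;> omega
    cases bs with
    | nil => simp at h1
    | cons b' bs'' =>
      have hb' : b' = 0 ∨ b' = 1 := hb b' (by simp)
      have hbs'' : Bits01 bs'' := fun z hz => hb z (by simp [hz])
      simp only [insGo, updAux]
      by_cases hbb : b' = pvBit x i
      · subst hbb
        cases bs'' with
        | nil =>
          rw [updAux_getD x 1 rest _ _ _ hp', pvEnc_singleton, PySem.Dict.getD_modify_self]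
          have hnot : (p0 * 2 + pvBit x i) ∉ pathKeys x rest (p0 * 2 + pvBit x i) :=
            fun hm => absurd (pathKeys_gt x rest _ _ hp' hm) (lt_irrefl _)
          rw [if_neg hnot]
          have hRb := hR [pvBit x i] (by intro z hz; simp at hz; subst hz; exact pvBit_01 x i)
            (by simp) (by simp)
          rw [pvEnc_singleton] at hRb
          simp only [PTrie.nodeAt] at hRb ⊢
          rw [childOf_setChild_self _ _ _ (pvBit_01 x i), countOf_insGo, countOf_setCount,
            countOf_ensure, hRb]
          ring
        | cons b2 bs3 =>
          have hR2 : RelT rest.length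
              (((t.childOf (pvBit x i)).ensure).setCount (((t.childOf (pvBit x i)).ensure).countOf + 1))
              (c.modify (p0 * 2 + pvBit x i) 0 (· + 1)) (p0 * 2 + pvBit x i) := by
            intro cs hcs hc1 hc2
            have hcsne : cs ≠ [] := by intro h'; subst h'; simp at hc1
            have hgt := pvEnc_gt cs (p0 * 2 + pvBit x i) hcs hp' hcsne
            rw [PySem.Dict.getD_modify, if_neg (by omega)]
            rw [← pvEnc_cons']
            have hRc := hR (pvBit x i :: cs)
              (by intro z hz; rcases List.mem_cons.mp hz with h' | h'
                  · subst h'; exact pvBit_01 x i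
                  · exact hcs z h')
              (by simp) (by simp; omega)
            rw [hRc]
            cases cs with
            | nil => exact absurd rfl hcsne
            | cons c0 cs0 =>
              simp only [PTrie.nodeAt, childOf_setCount, childOf_ensure]
          have happ := ih _ _ _ hp' hR2 (b2 :: bs3) hbs'' (by simp)
            (by simp at h2 ⊢; omega)
          rw [pvEnc_cons', happ]
          simp only [PTrie.nodeAt]
          rw [childOf_setChild_self _ _ _ (pvBit_01 x i)]
      · rw [updAux_getD x 1 rest _ _ _ hp']
        have hkne : pvEnc p0 (b' :: bs'') ≠ p0 * 2 + pvBit x i := by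
          intro he
          have hbl : Bits01 [pvBit x i] := by intro z hz; simp at hz; subst hz; exact pvBit_01 x i
          have := pvEnc_inj (b' :: bs'') [pvBit x i] p0 hb hbl hp (by rw [he, pvEnc_singleton])
          simp at this
          exact hbb this.1
        have hknot : pvEnc p0 (b' :: bs'') ∉ pathKeys x rest (p0 * 2 + pvBit x i) := by
          intro hm
          obtain ⟨cs, hcs, hcne, he⟩ := pathKeys_shape x rest _ _ hm
          rw [← pvEnc_cons'] at he
          have hbl : Bits01 (pvBit x i :: cs) := by
            intro z hz; rcases List.mem_cons.mp hz with h' | h'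
            · subst h'; exact pvBit_01 x i
            · exact hcs z h'
          have := pvEnc_inj (b' :: bs'') (pvBit x i :: cs) p0 hb hbl hp he
          simp at this
          exact hbb this.1
        rw [PySem.Dict.getD_modify, if_neg hkne, if_neg hknot, add_zero]
        rw [hR (b' :: bs'') hb h1 h2]
        simp only [PTrie.nodeAt]
        rw [childOf_setChild_of_ne _ _ _ _ (pvBit_01 x i) hb' hbb]

lemma L_rem (x : Int) : ∀ (is : List Nat) (t : PTrie) (c : PySem.Dict Int Int) (p0 : Int),
    1 ≤ p0 → RelT is.length t c p0 → RelT is.length (remGo x is t) (updAux x (-1) is p0 c) p0 := by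
  intro is
  induction is with
  | nil =>
    intro t c p0 _ _ bs _ h1 h2
    simp only [List.length_nil, Nat.le_zero] at h2
    exact absurd h1 (by omega)
  | cons i rest ih =>
    intro t c p0 hp hR bs hb h1 h2
    have hbit := pvBit_01 x i
    have hp' : 1 ≤ p0 * 2 + pvBit x i := by rcases hbit with h | h <;> omega
    cases bs with
    | nil => simp at h1
    | cons b' bs'' =>
      have hb' : b' = 0 ∨ b' = 1 := hb b' (by simp)
      have hbs'' : Bits01 bs'' := fun z hz => hb z (by simp [hz])
      simp only [remGo, updAux]
      by_cases hbb : b' = pvBit x i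
      · subst hbb
        cases bs'' with
        | nil =>
          rw [updAux_getD x (-1) rest _ _ _ hp', pvEnc_singleton, PySem.Dict.getD_modify_self]
          have hnot : (p0 * 2 + pvBit x i) ∉ pathKeys x rest (p0 * 2 + pvBit x i) :=
            fun hm => absurd (pathKeys_gt x rest _ _ hp' hm) (lt_irrefl _)
          rw [if_neg hnot]
          have hRb := hR [pvBit x i] (by intro z hz; simp at hz; subst hz; exact pvBit_01 x i)
            (by simp) (by simp)
          rw [pvEnc_singleton] at hRb
          simp only [PTrie.nodeAt] at hRb ⊢
          rw [childOf_setChild_self _ _ _ (pvBit_01 x i), countOf_remGo, countOf_setCount, hRb]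
          ring
        | cons b2 bs3 =>
          have hR2 : RelT rest.length
              ((t.childOf (pvBit x i)).setCount ((t.childOf (pvBit x i)).countOf - 1))
              (c.modify (p0 * 2 + pvBit x i) 0 (· + (-1))) (p0 * 2 + pvBit x i) := by
            intro cs hcs hc1 hc2
            have hcsne : cs ≠ [] := by intro h'; subst h'; simp at hc1
            have hgt := pvEnc_gt cs (p0 * 2 + pvBit x i) hcs hp' hcsne
            rw [PySem.Dict.getD_modify, if_neg (by omega)]
            rw [← pvEnc_cons']
            have hRc := hR (pvBit x i :: cs)
              (by intro z hz; rcases List.mem_cons.mp hz with h' | h'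
                  · subst h'; exact pvBit_01 x i
                  · exact hcs z h')
              (by simp) (by simp; omega)
            rw [hRc]
            cases cs with
            | nil => exact absurd rfl hcsne
            | cons c0 cs0 =>
              simp only [PTrie.nodeAt, childOf_setCount]
          have happ := ih _ _ _ hp' hR2 (b2 :: bs3) hbs'' (by simp)
            (by simp at h2 ⊢; omega)
          rw [pvEnc_cons', happ]
          simp only [PTrie.nodeAt]
          rw [childOf_setChild_self _ _ _ (pvBit_01 x i)]
      · rw [updAux_getD x (-1) rest _ _ _ hp']
        have hkne : pvEnc p0 (b' :: bs'') ≠ p0 * 2 + pvBit x i := by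
          intro he
          have hbl : Bits01 [pvBit x i] := by intro z hz; simp at hz; subst hz; exact pvBit_01 x i
          have := pvEnc_inj (b' :: bs'') [pvBit x i] p0 hb hbl hp (by rw [he, pvEnc_singleton])
          simp at this
          exact hbb this.1
        have hknot : pvEnc p0 (b' :: bs'') ∉ pathKeys x rest (p0 * 2 + pvBit x i) := by
          intro hm
          obtain ⟨cs, hcs, hcne, he⟩ := pathKeys_shape x rest _ _ hm
          rw [← pvEnc_cons'] at he
          have hbl : Bits01 (pvBit x i :: cs) := by
            intro z hz; rcases List.mem_cons.mp hz with h' | h'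
            · subst h'; exact pvBit_01 x i
            · exact hcs z h'
          have := pvEnc_inj (b' :: bs'') (pvBit x i :: cs) p0 hb hbl hp he
          simp at this
          exact hbb this.1
        rw [PySem.Dict.getD_modify, if_neg hkne, if_neg hknot, add_zero]
        rw [hR (b' :: bs'') hb h1 h2]
        simp only [PTrie.nodeAt]
        rw [childOf_setChild_of_ne _ _ _ _ (pvBit_01 x i) hb' hbb]

lemma pvLevels_length : pvLevels.length = 21 := by simp [pvLevels]

lemma RFull_insert (x : Int) (t : PTrie) (c : PySem.Dict Int Int) (hR : RFull t c) :
    RFull (insertA x t) (updB x 1 c) := by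
  unfold RFull insertA updB at *
  rw [← pvLevels_length] at hR ⊢
  exact L_ins x pvLevels t c 1 le_rfl hR

lemma RFull_remove (x : Int) (t : PTrie) (c : PySem.Dict Int Int) (hR : RFull t c) :
    RFull (removeA x t) (updB x (-1) c) := by
  unfold RFull removeA updB at *
  rw [← pvLevels_length] at hR ⊢
  exact L_rem x pvLevels t c 1 le_rfl hR

lemma RFull_init : RFull (PTrie.node 0 .nil .nil) PySem.Dict.empty := by
  intro bs hb h1 h2
  rw [PySem.Dict.getD_empty]
  cases bs with
  | nil => simp at h1
  | cons b bs' =>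
    have hchild : (PTrie.node 0 .nil .nil).childOf b = .nil := by
      simp [PTrie.childOf]
    simp only [PTrie.nodeAt, hchild, nodeAt_nil]
    rfl

-- ---- the two answer computations agree under the invariant ----

lemma MX (x : Int) : ∀ (is : List Nat) (bs : List Int) (t : PTrie) (c : PySem.Dict Int Int) (ans : Int),
    RFull t c → Bits01 bs → bs.length + is.length = 21 →
    maxGo x is (t.nodeAt bs) ans = bestAux c x is (pvEnc 1 bs) ans := by
  intro is
  induction is with
  | nil => intros; simp [maxGo, bestAux]
  | cons i rest ih =>
    intro bs t c ans hR hb hlen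
    have hbit := pvBit_01 x i
    have hw : (1 - pvBit x i) = 0 ∨ (1 - pvBit x i) = 1 := by
      rcases hbit with h | h <;> rw [h] <;> norm_num
    have hbw : Bits01 (bs ++ [1 - pvBit x i]) := by
      intro z hz; rcases List.mem_append.mp hz with h' | h'
      · exact hb z h'
      · simp at h'; subst h'; exact hw
    have hbb : Bits01 (bs ++ [pvBit x i]) := by
      intro z hz; rcases List.mem_append.mp hz with h' | h'
      · exact hb z h'
      · simp at h'; subst h'; exact hbit
    have hkey := hR (bs ++ [1 - pvBit x i]) hbw (by simp) (by simp at hlen ⊢; omega)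
    rw [pvEnc_append_singleton, nodeAt_append_singleton] at hkey
    simp only [maxGo, bestAux]
    by_cases hpos : c.getD ((pvEnc 1 bs) * 2 + (1 - pvBit x i)) 0 > 0
    · have hcpos : ((t.nodeAt bs).childOf (1 - pvBit x i)).countOf > 0 := by rw [← hkey]; exact hpos
      rw [if_pos (And.intro (countOf_pos_ne_nil hcpos) hcpos), if_pos hpos]
      have := ih (bs ++ [1 - pvBit x i]) t c (PySem.Int.bor ans (1 <<< i)) hR hbw
        (by simp at hlen ⊢; omega)
      rw [nodeAt_append_singleton, pvEnc_append_singleton] at this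
      exact this
    · have hcond : ¬ ((t.nodeAt bs).childOf (1 - pvBit x i) ≠ PTrie.nil ∧
          ((t.nodeAt bs).childOf (1 - pvBit x i)).countOf > 0) := by
        rintro ⟨_, hgt⟩
        exact hpos (by rw [hkey]; exact hgt)
      rw [if_neg hcond, if_neg hpos]
      have := ih (bs ++ [pvBit x i]) t c ans hR hbb (by simp at hlen ⊢; omega)
      rw [nodeAt_append_singleton, pvEnc_append_singleton] at this
      exact this

lemma maxXor_eq (x : Int) (t : PTrie) (c : PySem.Dict Int Int) (hR : RFull t c) :
    maxXorA x t = bestB c x := by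
  have := MX x pvLevels [] t c 0 hR (by intro z hz; simp at hz) (by simp [pvLevels])
  exact this

-- ---- small-step lemmas for the two traversals ----

lemma runB_nil (tree : PySem.Dict Int (List Int)) (qs : PySem.Dict Int (List (Int × Int)))
    (f : Nat) (rem : Finset Int) (cnt : PySem.Dict Int Int) (res : List Int) :
    runB tree qs f [] rem cnt res = res := by
  cases f <;> simp [runB, runBStep]

lemma runB_exit (tree : PySem.Dict Int (List Int)) (qs : PySem.Dict Int (List (Int × Int)))
    (f : Nat) (node : Int) (rest : List (Int × Bool)) (rem : Finset Int)
    (cnt : PySem.Dict Int Int) (res : List Int) :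
    runB tree qs (f + 1) ((node, true) :: rest) rem cnt res
      = runB tree qs (f + 1) rest rem (updB node (-1) cnt) res := by
  simp only [runB, runBStep]

lemma runB_skip (tree : PySem.Dict Int (List Int)) (qs : PySem.Dict Int (List (Int × Int)))
    (f : Nat) (node : Int) (rest : List (Int × Bool)) (rem : Finset Int)
    (cnt : PySem.Dict Int Int) (res : List Int) (h : node ∉ rem) :
    runB tree qs (f + 1) ((node, false) :: rest) rem cnt res
      = runB tree qs (f + 1) rest rem cnt res := by
  simp only [runB, runBStep, if_neg h]

lemma runB_visit (tree : PySem.Dict Int (List Int)) (qs : PySem.Dict Int (List (Int × Int)))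
    (f : Nat) (node : Int) (rest : List (Int × Bool)) (rem : Finset Int)
    (cnt : PySem.Dict Int Int) (res : List Int) (h : node ∈ rem) :
    runB tree qs (f + 1) ((node, false) :: rest) rem cnt res
      = runB tree qs f ((tree.getD node []).map (fun c => (c, false)) ++ (node, true) :: rest)
          (rem.erase node) (updB node 1 cnt)
          ((qs.getD node []).foldl (fun r vi => r.set vi.2.toNat (bestB (updB node 1 cnt) vi.1)) res) := by
  simp only [runB, runBStep, if_pos h]

lemma dfsA_notmem (tree : PySem.Dict Int (List Int)) (qs : PySem.Dict Int (List (Int × Int)))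
    (f : Nat) (node : Int) (rem : Finset Int) (trie : PTrie) (res : List Int) (h : node ∉ rem) :
    dfsA tree qs (f + 1) node rem trie res = (rem, trie, res) := by
  simp only [dfsA, if_neg h]

lemma dfsA_mem (tree : PySem.Dict Int (List Int)) (qs : PySem.Dict Int (List (Int × Int)))
    (f : Nat) (node : Int) (rem : Finset Int) (trie : PTrie) (res : List Int) (h : node ∈ rem) :
    dfsA tree qs (f + 1) node rem trie res
      = ((((tree.getD node []).foldl (fun acc c => dfsA tree qs f c acc.1 acc.2.1 acc.2.2)
            (rem.erase node, insertA node trie,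
             (qs.getD node []).foldl (fun r vi => r.set vi.2.toNat (maxXorA vi.1 (insertA node trie))) res))).1,
         removeA node ((tree.getD node []).foldl (fun acc c => dfsA tree qs f c acc.1 acc.2.1 acc.2.2)
            (rem.erase node, insertA node trie,
             (qs.getD node []).foldl (fun r vi => r.set vi.2.toNat (maxXorA vi.1 (insertA node trie))) res)).2.1,
         ((tree.getD node []).foldl (fun acc c => dfsA tree qs f c acc.1 acc.2.1 acc.2.2)
            (rem.erase node, insertA node trie,
             (qs.getD node []).foldl (fun r vi => r.set vi.2.toNat (maxXorA vi.1 (insertA node trie))) res)).2.2) := by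
  simp only [dfsA, if_pos h]

-- ---- the stack machine of B runs A's recursion step for step ----

lemma DF (tree : PySem.Dict Int (List Int)) (qs : PySem.Dict Int (List (Int × Int))) :
    ∀ (N : Nat) (rem : Finset Int), rem.card ≤ N →
    ∀ (node : Int) (rest : List (Int × Bool)) (trie : PTrie) (cnt : PySem.Dict Int Int) (res : List Int),
      RFull trie cnt →
      ∃ (k : Nat) (cnt' : PySem.Dict Int Int),
        k + ((dfsA tree qs (N + 1) node rem trie res).1).card = rem.card ∧
        RFull ((dfsA tree qs (N + 1) node rem trie res).2.1) cnt' ∧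
        ∀ m : Nat, 1 ≤ m →
          runB tree qs (m + k) ((node, false) :: rest) rem cnt res
            = runB tree qs m rest ((dfsA tree qs (N + 1) node rem trie res).1) cnt'
                ((dfsA tree qs (N + 1) node rem trie res).2.2) := by
  intro N
  induction N with
  | zero =>
    intro rem hc node rest trie cnt res hR
    have hmem : node ∉ rem := by
      have : rem = ∅ := Finset.card_eq_zero.mp (Nat.le_zero.mp hc)
      subst this; simp
    refine ⟨0, cnt, ?_, ?_, ?_⟩
    · rw [dfsA_notmem _ _ _ _ _ _ _ hmem]; simp
    · rw [dfsA_notmem _ _ _ _ _ _ _ hmem]; exact hR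
    · intro m hm
      obtain ⟨m', rfl⟩ := Nat.exists_eq_add_of_le hm
      rw [dfsA_notmem _ _ _ _ _ _ _ hmem]
      rw [show 1 + m' + 0 = m' + 1 by omega, show (1 : Nat) + m' = m' + 1 by omega]
      exact runB_skip _ _ _ _ _ _ _ _ hmem
  | succ N ih =>
    intro rem hc node rest trie cnt res hR
    by_cases hmem : node ∈ rem
    · have hcard1 : 1 ≤ rem.card := Finset.card_pos.mpr ⟨node, hmem⟩
      have hc' : (rem.erase node).card ≤ N := by
        rw [Finset.card_erase_of_mem hmem]; omega
      have hR1 := RFull_insert node trie cnt hR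
      have hfold : (fun (r : List Int) (vi : Int × Int) => r.set vi.2.toNat (maxXorA vi.1 (insertA node trie)))
          = (fun (r : List Int) (vi : Int × Int) => r.set vi.2.toNat (bestB (updB node 1 cnt) vi.1)) := by
        funext r vi
        rw [maxXor_eq vi.1 (insertA node trie) (updB node 1 cnt) hR1]
      have DL : ∀ (cs : List Int) (rem2 : Finset Int), rem2.card ≤ N →
          ∀ (rest2 : List (Int × Bool)) (trie2 : PTrie) (cnt2 : PySem.Dict Int Int) (res2 : List Int),
          RFull trie2 cnt2 →
          ∃ (kL : Nat) (cnt' : PySem.Dict Int Int),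
            kL + ((cs.foldl (fun acc c => dfsA tree qs (N + 1) c acc.1 acc.2.1 acc.2.2) (rem2, trie2, res2)).1).card = rem2.card ∧
            RFull ((cs.foldl (fun acc c => dfsA tree qs (N + 1) c acc.1 acc.2.1 acc.2.2) (rem2, trie2, res2)).2.1) cnt' ∧
            ∀ m : Nat, 1 ≤ m →
              runB tree qs (m + kL) (cs.map (fun c => (c, false)) ++ rest2) rem2 cnt2 res2
                = runB tree qs m rest2
                    ((cs.foldl (fun acc c => dfsA tree qs (N + 1) c acc.1 acc.2.1 acc.2.2) (rem2, trie2, res2)).1) cnt'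
                    ((cs.foldl (fun acc c => dfsA tree qs (N + 1) c acc.1 acc.2.1 acc.2.2) (rem2, trie2, res2)).2.2) := by
        intro cs
        induction cs with
        | nil =>
          intro rem2 _ rest2 trie2 cnt2 res2 hR2
          exact ⟨0, cnt2, by simp, by simpa using hR2, fun m _ => by simp⟩
        | cons c cs' ihc =>
          intro rem2 hc2 rest2 trie2 cnt2 res2 hR2
          obtain ⟨k1, cnt1, hk1, hRf1, hrun1⟩ :=
            ih rem2 hc2 c (cs'.map (fun c => (c, false)) ++ rest2) trie2 cnt2 res2 hR2
          have hstep : dfsA tree qs (N + 1) c (rem2, trie2, res2).1 (rem2, trie2, res2).2.1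
                (rem2, trie2, res2).2.2
              = ((dfsA tree qs (N + 1) c rem2 trie2 res2).1,
                 (dfsA tree qs (N + 1) c rem2 trie2 res2).2.1,
                 (dfsA tree qs (N + 1) c rem2 trie2 res2).2.2) := rfl
          obtain ⟨k2, cnt2', hk2, hRf2, hrun2⟩ :=
            ihc ((dfsA tree qs (N + 1) c rem2 trie2 res2).1) (by omega) rest2
              ((dfsA tree qs (N + 1) c rem2 trie2 res2).2.1) cnt1
              ((dfsA tree qs (N + 1) c rem2 trie2 res2).2.2) hRf1
          refine ⟨k1 + k2, cnt2', ?_, ?_, ?_⟩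
          · rw [List.foldl_cons, hstep]; omega
          · rw [List.foldl_cons, hstep]; exact hRf2
          · intro m hm
            rw [List.map_cons, List.cons_append, List.foldl_cons, hstep]
            rw [show m + (k1 + k2) = (m + k2) + k1 by omega]
            rw [hrun1 (m + k2) (by omega), hrun2 m hm]
      obtain ⟨kL, cnt2, hkL, hRL, hrunL⟩ := DL (tree.getD node []) (rem.erase node) hc'
        ((node, true) :: rest) (insertA node trie) (updB node 1 cnt)
        ((qs.getD node []).foldl (fun r vi => r.set vi.2.toNat (bestB (updB node 1 cnt) vi.1)) res) hR1
      refine ⟨kL + 1, updB node (-1) cnt2, ?_, ?_, ?_⟩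
      · rw [dfsA_mem _ _ _ _ _ _ _ hmem, hfold]
        dsimp only
        have hce := Finset.card_erase_of_mem hmem
        omega
      · rw [dfsA_mem _ _ _ _ _ _ _ hmem, hfold]
        exact RFull_remove _ _ _ hRL
      · intro m hm
        obtain ⟨m', rfl⟩ := Nat.exists_eq_add_of_le hm
        rw [dfsA_mem _ _ _ _ _ _ _ hmem, hfold]
        rw [show 1 + m' + (kL + 1) = (1 + m' + kL) + 1 by omega]
        rw [runB_visit _ _ _ _ _ _ _ _ hmem]
        rw [show 1 + m' + kL = (1 + m') + kL by omega]
        rw [hrunL (1 + m') (by omega)]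
        rw [show (1 : Nat) + m' = m' + 1 by omega]
        rw [runB_exit]
    · refine ⟨0, cnt, ?_, ?_, ?_⟩
      · rw [dfsA_notmem _ _ _ _ _ _ _ hmem]; simp
      · rw [dfsA_notmem _ _ _ _ _ _ _ hmem]; exact hR
      · intro m hm
        obtain ⟨m', rfl⟩ := Nat.exists_eq_add_of_le hm
        rw [dfsA_notmem _ _ _ _ _ _ _ hmem]
        rw [show 1 + m' + 0 = m' + 1 by omega, show (1 : Nat) + m' = m' + 1 by omega]
        exact runB_skip _ _ _ _ _ _ _ _ hmem

lemma pvRemaining_card_le (n : Nat) : (pvRemaining n).card ≤ n := by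
  unfold pvRemaining
  exact le_trans Finset.card_image_le (by simp)

-- under Pre_ a root index is found
lemma root_some (parents : List Int) (h : (-1 : Int) ∈ parents) :
    ∃ r, (pvBuildTree parents).2 = some r := by
  have aux : ∀ (l : List (Int × Int)) (acc : PySem.Dict Int (List Int) × Option Int),
      ((∃ pr ∈ l, pr.2 = -1) ∨ (∃ r, acc.2 = some r)) →
      ∃ r, (l.foldl
        (fun acc cp =>
          if cp.2 = -1 then (acc.1, some cp.1)
          else (acc.1.insert cp.2 (acc.1.getD cp.2 [] ++ [cp.1]), acc.2)) acc).2 = some r := by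
    intro l
    induction l with
    | nil =>
      intro acc hacc
      rcases hacc with ⟨pr, hpr, _⟩ | h'
      · simp at hpr
      · exact h'
    | cons pr l' ihl =>
      intro acc hacc
      rw [List.foldl_cons]
      apply ihl
      rcases hacc with ⟨q, hq, hq2⟩ | ⟨r, hr⟩
      · rcases List.mem_cons.mp hq with h' | h'
        · subst h'; right; exact ⟨q.1, by simp [hq2]⟩
        · left; exact ⟨q, h', hq2⟩
      · by_cases hcnd : pr.2 = -1
        · right; exact ⟨pr.1, by simp [hcnd]⟩
        · right; exact ⟨r, by simp [hcnd]; exact hr⟩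
  obtain ⟨k, hk, he⟩ := List.mem_iff_getElem.mp h
  apply aux
  left
  refine ⟨((0:Int) + k, parents[k]), ?_, by simpa using he⟩
  rw [PySem.List.mem_enumerate_iff]
  exact ⟨k, hk, rfl⟩

-- ===== VERDICT (by name: the statement is the Claim_ definition above) =====
theorem maxGeneticDifference_spec : Claim_equal_maxGeneticDifference := by
  intro parents queries _hdom hpre
  unfold Spec_maxGeneticDifference maxGeneticDifference maxGeneticDifference_alt
  obtain ⟨r, hr⟩ := root_some parents hpre.1
  rw [hr]
  dsimp only
  obtain ⟨k, cnt', hk, _, hrun⟩ := DF (pvBuildTree parents).1 (pvGroupQueries queries)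
    parents.length (pvRemaining parents.length) (pvRemaining_card_le parents.length) r []
    (PTrie.node 0 .nil .nil) PySem.Dict.empty (List.replicate queries.length 0) RFull_init
  have hkn : k ≤ parents.length := by
    have := pvRemaining_card_le parents.length
    omega
  have hfuel : parents.length + 1 = (parents.length + 1 - k) + k := by omega
  conv_rhs => rw [hfuel]
  rw [hrun (parents.length + 1 - k) (by omega), runB_nil]
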